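-- pv_equiv track=rewrite | github.com/joaovmour4/memory-manager-paginacao | memory.py | verifyMemory
-- ===== SOURCE A (Python) =====
-- def verifyMemory(memory, size):
--     aux = 0
--     for elemento in memory.keys():
--         if memory[elemento] != ' ':
--             aux = 0
--         else:
--             aux += 1
--             if aux == size:
--                 return elemento - (size - 1)
-- ===== SOURCE B (Python) =====
-- def verifyMemory(memory, size):
--     if size <= 0:
--         return None
--     items = list(memory.items())
--     for i in range(len(items) - size + 1):
--         if all(items[j][1] == ' ' for j in range(i, i + size)):
--             return items[i + size - 1][0] - (size - 1)
--     return None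
-- ===== Notes on version B (the rewrite author's own statement) =====
-- stated objective: alternative
-- what changed: Replaced the running-counter reset scan with a sliding-window scan: for each start index, test whether the next size slots are all empty and return the window's last key minus (size-1); no counter state is kept.
import Mathlib
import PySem

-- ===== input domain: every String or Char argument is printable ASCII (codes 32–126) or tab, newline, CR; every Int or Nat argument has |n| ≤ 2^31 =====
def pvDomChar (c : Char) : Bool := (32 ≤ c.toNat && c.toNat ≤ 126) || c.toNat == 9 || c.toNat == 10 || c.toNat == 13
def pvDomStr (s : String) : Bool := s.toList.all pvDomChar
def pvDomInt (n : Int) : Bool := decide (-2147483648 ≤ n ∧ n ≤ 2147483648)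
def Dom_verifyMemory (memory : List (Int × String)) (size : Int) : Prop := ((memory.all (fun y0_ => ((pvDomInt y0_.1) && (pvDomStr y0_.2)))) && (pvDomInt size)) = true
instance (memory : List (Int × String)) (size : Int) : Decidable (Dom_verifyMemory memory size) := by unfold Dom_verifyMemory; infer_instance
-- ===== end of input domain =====

-- B replaces A's running-counter reset scan by a sliding-window scan (alternative
-- algorithm of similar cost); return values proved equal on all inputs.

-- ===== PORT A =====
-- A iterates `for elemento in memory.keys(): … memory[elemento] …`, which over a dict
-- is exactly a walk over its (key, value) items in order, with a running counter `aux`.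
def verifyMemoryGo (size : Int) : List (Int × String) → Int → Option Int
  | [], _ => none
  | (k, v) :: rest, aux =>
      if v ≠ " " then verifyMemoryGo size rest 0
      else
        if aux + 1 = size then some (k - (size - 1))
        else verifyMemoryGo size rest (aux + 1)

def verifyMemory (memory : List (Int × String)) (size : Int) : Option Int :=
  verifyMemoryGo size (PySem.Dict.ofList memory).items 0

-- ===== PORT B =====
-- for i in range(len(items) - size + 1): if all(items[j][1] == ' ' for j in range(i, i + size)): return items[i + size - 1][0] - (size - 1)
-- (early-return for-loop over range → structural recursion over the range list)
def verifyMemoryAltLoop (items : List (Int × String)) (size : Int) : List Int → Option Int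
  | [] => none
  | i :: is =>
      if (PySem.List.pyRange i (i + size) 1).all
           (fun j => (PySem.List.pyGet? items j).any (fun p => p.2 == " ")) then
        (PySem.List.pyGet? items (i + size - 1)).map (fun p => p.1 - (size - 1))
      else verifyMemoryAltLoop items size is

def verifyMemory_alt (memory : List (Int × String)) (size : Int) : Option Int :=
  if size ≤ 0 then none
  else
    verifyMemoryAltLoop (PySem.Dict.ofList memory).items size
      (PySem.List.pyRange 0 (((PySem.Dict.ofList memory).items.length : Int) - size + 1) 1)

-- ===== PRECONDITION & SPEC =====
def Spec_verifyMemory (memory : List (Int × String)) (size : Int) (out : Option Int) : Prop := out = verifyMemory_alt memory size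
instance (memory : List (Int × String)) (size : Int) (out : Option Int) : Decidable (Spec_verifyMemory memory size out) := by unfold Spec_verifyMemory; infer_instance

-- ===== CLAIM (what is proved, stated in full; the proofs are below) =====
def Claim_equal_verifyMemory : Prop := ∀ (memory : List (Int × String)) (size : Int), Dom_verifyMemory memory size → Spec_verifyMemory memory size (verifyMemory memory size)

-- ===== LEMMAS AND PROOFS =====

-- proof-side helper: the same window scan phrased on the suffix of the list
def pvScan (size : Int) (rest : List (Int × String)) : Option Int :=
  if (size : Int) ≤ (rest.length : Int) then
    if (PySem.List.slice rest (some 0) (some size)).all (fun p => p.2 == " ") then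
      (PySem.List.pyGet? (PySem.List.slice rest (some 0) (some size)) (-1)).map
        (fun p => p.1 - (size - 1))
    else
      pvScan size rest.tail
  else none
termination_by rest.length
decreasing_by
  cases rest with
  | nil =>
      exfalso
      rename_i hall
      simp only [List.all_eq_true, Prod.forall] at hall
      push Not at hall
      obtain ⟨x, y, hmem, _⟩ := hall
      exact absurd (PySem.List.mem_of_mem_slice _ _ _ hmem) (by simp)
  | cons a l => simp


-- abbreviation used throughout: "this slot is empty"
def pvSp (p : Int × String) : Bool := p.2 == " "

theorem goA_nonpos (s : Int) (hs : s ≤ 0) :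
    ∀ (l : List (Int × String)) (a : Int), 0 ≤ a → verifyMemoryGo s l a = none := by
  intro l
  induction l with
  | nil => intro a _; rfl
  | cons p rest ih =>
      intro a ha
      obtain ⟨k, v⟩ := p
      by_cases hv : v = " "
      · have h1 : ¬ (a + 1 = s) := by omega
        simp only [verifyMemoryGo]
        rw [if_neg (by simp [hv]), if_neg h1]
        exact ih (a + 1) (by omega)
      · simp only [verifyMemoryGo]
        rw [if_pos (by exact hv)]
        exact ih 0 le_rfl

theorem goA_succ (n : Nat) :
    ∀ (l : List (Int × String)) (a : Nat), a < n → n - a ≤ l.length →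
    (l.take (n - a)).all pvSp = true →
    verifyMemoryGo (n : Int) l (a : Int) = (l[n - a - 1]?).map (fun p => p.1 - ((n : Int) - 1)) := by
  intro l
  induction l with
  | nil => intro a ha hlen _; simp at hlen; omega
  | cons p rest ih =>
      intro a ha hlen hall
      obtain ⟨k, v⟩ := p
      obtain ⟨m, hm⟩ : ∃ m, n - a = m + 1 := ⟨n - a - 1, by omega⟩
      rw [hm, List.take_succ_cons, List.all_cons, Bool.and_eq_true] at hall
      obtain ⟨hv', hall2⟩ := hall
      have hv : v = " " := by simpa [pvSp] using hv'
      simp only [verifyMemoryGo]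
      rw [if_neg (by simp [hv])]
      by_cases hend : a + 1 = n
      · have h1 : (a : Int) + 1 = (n : Int) := by omega
        have hm0 : m = 0 := by omega
        rw [if_pos h1, hm, hm0]
        simp [hv]
      · have h1 : ¬ ((a : Int) + 1 = (n : Int)) := by omega
        rw [if_neg h1]
        have hc : (a : Int) + 1 = ((a + 1 : Nat) : Int) := by push_cast; ring
        have hm' : n - (a + 1) = m := by omega
        rw [hc, ih (a + 1) (by omega) (by simp at hlen ⊢; omega) (by rw [hm']; exact hall2), hm']
        obtain ⟨m', hm''⟩ : ∃ m', m = m' + 1 := ⟨m - 1, by omega⟩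
        rw [hm, hm'']
        simp

theorem goA_skip (n : Nat) :
    ∀ (l1 : List (Int × String)) (p : Int × String) (l2 : List (Int × String)) (a : Nat),
    l1.all pvSp = true → pvSp p = false → l1.length + a < n →
    verifyMemoryGo (n : Int) (l1 ++ p :: l2) (a : Int) = verifyMemoryGo (n : Int) l2 0 := by
  intro l1
  induction l1 with
  | nil =>
      intro p l2 a _ hp _
      obtain ⟨k, v⟩ := p
      have hv : ¬ v = " " := by simpa [pvSp] using hp
      simp only [List.nil_append, verifyMemoryGo]
      rw [if_pos (by exact hv)]
  | cons q l1' ih =>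
      intro p l2 a hall hp hlt
      obtain ⟨k, v⟩ := q
      rw [List.all_cons, Bool.and_eq_true] at hall
      obtain ⟨hv', hall2⟩ := hall
      have hv : v = " " := by simpa [pvSp] using hv'
      have h1 : ¬ ((a : Int) + 1 = (n : Int)) := by simp at hlt; omega
      have hc : (a : Int) + 1 = ((a + 1 : Nat) : Int) := by push_cast; ring
      simp only [List.cons_append, verifyMemoryGo]
      rw [if_neg (by simp [hv]), if_neg h1, hc]
      exact ih p l2 (a + 1) hall2 hp (by simp at hlt ⊢; omega)

theorem goA_all_sp (n : Nat) :
    ∀ (l : List (Int × String)) (a : Nat), l.all pvSp = true → l.length + a < n →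
    verifyMemoryGo (n : Int) l (a : Int) = none := by
  intro l
  induction l with
  | nil => intro a _ _; rfl
  | cons p rest ih =>
      intro a hall hlt
      obtain ⟨k, v⟩ := p
      rw [List.all_cons, Bool.and_eq_true] at hall
      obtain ⟨hv', hall2⟩ := hall
      have hv : v = " " := by simpa [pvSp] using hv'
      have h1 : ¬ ((a : Int) + 1 = (n : Int)) := by simp at hlt; omega
      have hc : (a : Int) + 1 = ((a + 1 : Nat) : Int) := by push_cast; ring
      simp only [verifyMemoryGo]
      rw [if_neg (by simp [hv]), if_neg h1, hc]
      exact ih (a + 1) hall2 (by simp at hlt; omega)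

theorem altGo_window (n : Nat) (l : List (Int × String)) :
    PySem.List.slice l (some 0) (some (n : Int)) = l.take n := by
  simp [PySem.List.slice_to_natCast]

theorem altGo_succ (n : Nat) (l : List (Int × String)) (h1 : 1 ≤ n) (hlen : n ≤ l.length)
    (hall : (l.take n).all pvSp = true) :
    pvScan (n : Int) l = (l[n - 1]?).map (fun p => p.1 - ((n : Int) - 1)) := by
  rw [pvScan]
  have hg : (n : Int) ≤ (l.length : Int) := by omega
  rw [if_pos hg, altGo_window n l]
  have hall' : (l.take n).all (fun p => p.2 == " ") = true := hall
  rw [if_pos hall']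
  rw [PySem.List.pyGet?_neg_one]
  have hlt : (l.take n).length = n := by simp; omega
  rw [List.getLast?_eq_getElem?, hlt]
  congr 1
  exact List.getElem?_take_of_lt (by omega)

theorem altGo_skip (n : Nat) :
    ∀ (l1 : List (Int × String)) (p : Int × String) (l2 : List (Int × String)),
    l1.all pvSp = true → pvSp p = false → l1.length < n →
    pvScan (n : Int) (l1 ++ p :: l2) = pvScan (n : Int) l2 := by
  intro l1
  induction l1 with
  | nil =>
      intro p l2 _ hp hn
      simp only [List.nil_append]
      rw [pvScan]
      by_cases hg : (n : Int) ≤ (((p :: l2).length : Nat) : Int)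
      · rw [if_pos hg, altGo_window n _]
        have hfalse : ((p :: l2).take n).all (fun q => q.2 == " ") = false := by
          obtain ⟨m, hm⟩ : ∃ m, n = m + 1 := ⟨n - 1, by omega⟩
          rw [hm, List.take_succ_cons, List.all_cons]
          have hp' : (p.2 == " ") = false := hp
          simp [hp']
        rw [if_neg (by rw [hfalse]; exact Bool.false_ne_true)]
        rfl
      · rw [if_neg hg]
        rw [pvScan]
        rw [if_neg (by simp at hg ⊢; omega)]
  | cons q l1' ih =>
      intro p l2 hall hp hlt
      rw [List.all_cons, Bool.and_eq_true] at hall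
      obtain ⟨hv', hall2⟩ := hall
      rw [pvScan]
      by_cases hg : (n : Int) ≤ ((((q :: l1') ++ p :: l2).length : Nat) : Int)
      · rw [if_pos hg, altGo_window n _]
        have hlen1 : (q :: l1').length ≤ n := by simp at hlt ⊢; omega
        have hfalse : (((q :: l1') ++ p :: l2).take n).all (fun r => r.2 == " ") = false := by
          obtain ⟨m, hm⟩ : ∃ m, n - (q :: l1').length = m + 1 :=
            ⟨n - (q :: l1').length - 1, by simp at hlt ⊢; omega⟩
          rw [List.take_append, List.take_of_length_le hlen1, hm, List.take_succ_cons,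
            List.all_append, List.all_cons]
          have hp' : (p.2 == " ") = false := hp
          simp [hp']
        rw [if_neg (by rw [hfalse]; exact Bool.false_ne_true)]
        have htail : ((q :: l1') ++ p :: l2).tail = l1' ++ p :: l2 := by simp
        rw [htail]
        exact ih p l2 hall2 hp (by simp at hlt ⊢; omega)
      · rw [if_neg hg]
        rw [pvScan]
        rw [if_neg (by simp at hg ⊢; omega)]

theorem main_equiv (n : Nat) (hn : 1 ≤ n) :
    ∀ (l : List (Int × String)), verifyMemoryGo (n : Int) l 0 = pvScan (n : Int) l := by
  intro l
  induction hlen : l.length using Nat.strong_induction_on generalizing l with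
  | _ N ih =>
  subst hlen
  have hdecomp : l = l.takeWhile pvSp ++ l.dropWhile pvSp := (List.takeWhile_append_dropWhile).symm
  have htw : (l.takeWhile pvSp).all pvSp = true := by
    rw [List.all_eq_true]; intro x hx; exact List.mem_takeWhile_imp hx
  have h0 : (0 : Int) = ((0 : Nat) : Int) := by norm_num
  cases hdw : l.dropWhile pvSp with
  | nil =>
      have hall : l.all pvSp = true := by
        conv_lhs => rw [hdecomp, hdw]
        simp [htw]
      by_cases hle : n ≤ l.length
      · have htake : (l.take n).all pvSp = true := by
          rw [List.all_eq_true] at hall ⊢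
          intro x hx; exact hall x (List.mem_of_mem_take hx)
        rw [h0, goA_succ n l 0 (by omega) (by omega) (by simpa using htake)]
        rw [altGo_succ n l hn hle htake]
        simp
      · rw [h0, goA_all_sp n l 0 hall (by omega)]
        rw [pvScan, if_neg (by simp; omega)]
  | cons p l2 =>
      have hp : pvSp p = false := by
        have := List.head?_dropWhile_not pvSp l
        rw [hdw] at this
        simpa using this
      by_cases hcase : n ≤ (l.takeWhile pvSp).length
      · -- the all-space prefix already contains a full window
        have hlen2 : n ≤ l.length := le_trans hcase (List.takeWhile_prefix pvSp).length_le
        have htake : (l.take n).all pvSp = true := by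
          conv_lhs => rw [hdecomp]
          rw [List.take_append, List.all_append]
          have hz : n - (l.takeWhile pvSp).length = 0 := by omega
          rw [hz]
          simp only [List.take_zero, List.all_nil, Bool.and_true]
          rw [List.all_eq_true] at htw ⊢
          intro x hx; exact htw x (List.mem_of_mem_take hx)
        rw [h0, goA_succ n l 0 (by omega) (by omega) (by simpa using htake)]
        rw [altGo_succ n l hn hlen2 htake]
        simp
      · -- skip past the first non-empty slot on both sides, then induct
        have hlt : (l.takeWhile pvSp).length < n := by omega
        conv_lhs => rw [hdecomp, hdw, h0]
        conv_rhs => rw [hdecomp, hdw]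
        rw [goA_skip n _ p l2 0 htw hp (by omega)]
        rw [altGo_skip n _ p l2 htw hp hlt]
        have hshort : l2.length < l.length := by
          conv_rhs => rw [hdecomp, hdw]
          simp only [List.length_append, List.length_cons]
          omega
        exact ih l2.length hshort l2 rfl


theorem bridge_check (items : List (Int × String)) (i n : Nat) (h : i + n ≤ items.length) :
    ((PySem.List.pyRange (i : Int) ((i : Int) + (n : Int)) 1).all
      (fun j => (PySem.List.pyGet? items j).any (fun p => p.2 == " ")))
    = ((items.drop i).take n).all pvSp := by
  rw [PySem.List.pyRange_one]
  have hb : (((i : Int) + (n : Int)) - (i : Int)).toNat = n := by omega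
  rw [hb, List.all_map, Bool.eq_iff_iff, List.all_eq_true, List.all_eq_true]
  have hg : ∀ (k : Nat) (hk : k < n),
      (Option.any (fun p => p.2 == " ") (PySem.List.pyGet? items ((i : Int) + (k : Int))))
        = pvSp (items[i + k]'(by omega)) := by
    intro k hk
    have hc : (i : Int) + (k : Int) = ((i + k : Nat) : Int) := by push_cast; ring
    have hlt : i + k < items.length := by omega
    simp only [hc, PySem.List.pyGet?_natCast, List.getElem?_eq_getElem hlt]
    rfl
  constructor
  · intro hf x hx
    obtain ⟨k, hk, hxk⟩ := List.mem_iff_getElem.mp hx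
    have hkn : k < n := by
      simp only [List.length_take, List.length_drop] at hk; omega
    have hx' : x = items[i + k]'(by omega) := by
      rw [← hxk, List.getElem_take, List.getElem_drop]
    rw [hx', ← hg k hkn]
    simpa [Function.comp] using hf k (List.mem_range.mpr hkn)
  · intro hf k hk
    have hkn : k < n := List.mem_range.mp hk
    simp only [Function.comp_apply]
    rw [hg k hkn]
    apply hf
    exact List.mem_iff_getElem.mpr
      ⟨k, by simp only [List.length_take, List.length_drop]; omega,
        by rw [List.getElem_take, List.getElem_drop]⟩

theorem bridge_loop (n : Nat) (hn : 1 ≤ n) (items : List (Int × String)) :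
    ∀ (i : Nat),
    verifyMemoryAltLoop items (n : Int)
        (PySem.List.pyRange (i : Int) ((items.length : Int) - (n : Int) + 1) 1)
      = pvScan (n : Int) (items.drop i) := by
  intro i
  induction hm : items.length + 1 - i using Nat.strong_induction_on generalizing i with
  | _ N ih =>
  subst hm
  by_cases hcase : (items.length : Int) - (n : Int) + 1 ≤ (i : Int)
  · rw [PySem.List.pyRange_one_eq_nil hcase]
    rw [pvScan, if_neg (by simp; omega)]
    rfl
  · have hle : i + n ≤ items.length := by omega
    rw [PySem.List.pyRange_one_cons (by omega)]
    simp only [verifyMemoryAltLoop]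
    rw [bridge_check items i n hle]
    by_cases hw : ((items.drop i).take n).all pvSp = true
    · rw [if_pos hw]
      rw [altGo_succ n _ hn (by simp; omega) hw]
      rw [List.getElem?_drop]
      have hc : ((i : Int) + (n : Int) - 1) = ((i + (n - 1) : Nat) : Int) := by omega
      rw [hc, PySem.List.pyGet?_natCast]
    · rw [if_neg hw]
      rw [pvScan, if_pos (by simp; omega), altGo_window n _]
      rw [if_neg (by exact hw)]
      rw [List.tail_drop]
      have hc2 : (i : Int) + 1 = ((i + 1 : Nat) : Int) := by push_cast; ring
      rw [hc2]
      exact ih _ (by omega) (i + 1) rfl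

-- ===== VERDICT (by name: the statement is the Claim_ definition above) =====
theorem verifyMemory_spec : Claim_equal_verifyMemory := by
  unfold Claim_equal_verifyMemory Spec_verifyMemory
  intro memory size _
  unfold verifyMemory verifyMemory_alt
  by_cases hs : size ≤ 0
  · rw [if_pos hs, goA_nonpos size hs _ 0 le_rfl]
  · rw [if_neg hs]
    have hn : size = ((size.toNat : Nat) : Int) := by omega
    have h0 : (0 : Int) = ((0 : Nat) : Int) := by norm_num
    rw [hn, h0, bridge_loop size.toNat (by omega) _ 0, List.drop_zero]
    exact main_equiv size.toNat (by omega) _
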